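-- pv_equiv track=rewrite | github.com/stockenja/holdem_hand_rank | rank_holdem_hands.py | createTransformedHandOddsDict
-- ===== SOURCE A (Python) =====
-- def transformHand(handsStr):
--     handList = handsStr.split(",")
--     hand1 = handList[0].strip()
--     hand2 = handList[1].strip()
--
--     hand1Num = hand1[0]
--     hand1Suit = hand1[1]
--
--     hand2Num = hand2[0]
--     hand2Suit = hand2[1]
--
--     # Data is designed to have hand1Num > hand2Num
--     # Thus, no need to check and reverse the hands
--
--     # When hand is pair
--     if(hand1Num == hand2Num):
--         return ("Pair " + hand1Num.upper())
--
--     # When hand is suited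
--     if(hand1Suit == hand2Suit):
--         return ("Suited " + (hand1Num + hand2Num).upper())
--
--     return ("Offsuit " + (hand1Num + hand2Num).upper())
--
-- def createTransformedHandOddsDict(handList, oddsList):
--     transformedHandOddsDict = {}
--
--
--     for i in range(len(handList)):
--         hand = handList[i]
--         odds = oddsList[i]
--
--         transformedHand = transformHand(hand)
--
--         if(transformedHand not in transformedHandOddsDict):
--             transformedHandOddsDict[transformedHand] = []
--
--         transformedHandOddsDict[transformedHand].append(odds)
--
--     return transformedHandOddsDict
-- ===== SOURCE B (Python) =====
-- def transformHand(handsStr):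
--     handList = handsStr.split(",")
--     hand1 = handList[0].strip()
--     hand2 = handList[1].strip()
--
--     hand1Num = hand1[0]
--     hand1Suit = hand1[1]
--
--     hand2Num = hand2[0]
--     hand2Suit = hand2[1]
--
--     if(hand1Num == hand2Num):
--         return ("Pair " + hand1Num.upper())
--
--     if(hand1Suit == hand2Suit):
--         return ("Suited " + (hand1Num + hand2Num).upper())
--
--     return ("Offsuit " + (hand1Num + hand2Num).upper())
--
-- def createTransformedHandOddsDict(handList, oddsList):
--     pairs = [(transformHand(hand), odds) for hand, odds in zip(handList, oddsList)]
--     labels = list(dict.fromkeys(label for label, _ in pairs))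
--     return {label: [o for l, o in pairs if l == label] for label in labels}
-- ===== Notes on version B (the rewrite author's own statement) =====
-- stated objective: alternative
-- what changed: Instead of accumulating a dict on the fly while indexing both lists, B zips the lists into (label, odds) pairs, dedups the labels in first-occurrence order, and builds each dict entry by a per-label gathering pass over the pairs.
import Mathlib
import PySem

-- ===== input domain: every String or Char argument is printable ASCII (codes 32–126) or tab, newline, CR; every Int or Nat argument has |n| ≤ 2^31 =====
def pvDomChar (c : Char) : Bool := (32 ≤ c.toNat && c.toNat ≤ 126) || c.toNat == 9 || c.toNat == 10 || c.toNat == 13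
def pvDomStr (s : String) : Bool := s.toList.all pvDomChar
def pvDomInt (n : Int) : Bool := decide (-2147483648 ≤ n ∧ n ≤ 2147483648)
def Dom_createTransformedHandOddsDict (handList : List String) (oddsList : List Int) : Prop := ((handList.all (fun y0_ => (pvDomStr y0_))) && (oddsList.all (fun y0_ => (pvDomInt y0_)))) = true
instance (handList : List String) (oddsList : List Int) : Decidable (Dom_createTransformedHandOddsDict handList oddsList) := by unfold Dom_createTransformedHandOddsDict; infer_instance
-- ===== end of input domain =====

-- B replaces A's on-the-fly dict accumulation by zip → dedup labels → per-label gather (alternative decomposition, same results).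


-- ===== PORT A =====
-- shared helper of both Pythons (B keeps transformHand unchanged); the .getD defaults
-- stand where Python raises IndexError — those inputs are excluded by Pre_ below
def transformHand (handsStr : String) : String :=
  let handList := (PySem.Str.split? handsStr ",").getD []
  let hand1 := PySem.Str.strip (PySem.List.pyGetD handList 0 "")
  let hand2 := PySem.Str.strip (PySem.List.pyGetD handList 1 "")
  let hand1Num := (PySem.Str.pyGet? hand1 0).getD ' '
  let hand1Suit := (PySem.Str.pyGet? hand1 1).getD ' '
  let hand2Num := (PySem.Str.pyGet? hand2 0).getD ' '
  let hand2Suit := (PySem.Str.pyGet? hand2 1).getD ' '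
  if hand1Num = hand2Num then
    String.ofList ("Pair ".toList ++ PySem.Chars.upper [hand1Num])
  else if hand1Suit = hand2Suit then
    String.ofList ("Suited ".toList ++ PySem.Chars.upper [hand1Num, hand2Num])
  else
    String.ofList ("Offsuit ".toList ++ PySem.Chars.upper [hand1Num, hand2Num])

def createTransformedHandOddsDict (handList : List String) (oddsList : List Int) : List (String × List Int) :=
  let d := (PySem.List.pyRange 0 handList.length 1).foldl (fun d i =>
    let hand := PySem.List.pyGetD handList i ""
    let odds := PySem.List.pyGetD oddsList i 0
    let transformedHand := transformHand hand
    let d := if d.contains transformedHand then d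
             else d.insert transformedHand ([] : List Int)
    d.modify transformedHand [] (· ++ [odds])) PySem.Dict.empty
  d.items

-- ===== PORT B =====
def createTransformedHandOddsDict_alt (handList : List String) (oddsList : List Int) : List (String × List Int) :=
  let pairs := (handList.zip oddsList).map (fun p => (transformHand p.1, p.2))
  let labels := PySem.List.dedup (pairs.map (fun p => p.1))
  labels.map (fun label => (label, (pairs.filter (fun p => p.1 == label)).map (fun p => p.2)))

-- ===== PRECONDITION & SPEC =====
-- a list with at least two elements (the stripped hand halves must have two chars: a rank and a suit)
def pvTwoChars : List Char → Bool
  | _ :: _ :: _ => true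
  | _ => false

-- a hand string A accepts: it splits on "," into at least the two hands, and each hand,
-- once stripped, still has a rank character and a suit character
def pvHandOk (h : String) : Bool :=
  match (PySem.Str.split? h ",").getD [] with
  | part1 :: part2 :: _ =>
      pvTwoChars (PySem.Str.strip part1).toList && pvTwoChars (PySem.Str.strip part2).toList
  | _ => false

-- Pre_ excludes exactly the inputs where A raises IndexError: an oddsList shorter than
-- handList, a hand without a ",", or a hand whose stripped halves lack a rank or suit char.
def Pre_createTransformedHandOddsDict (handList : List String) (oddsList : List Int) : Prop :=
  handList.length ≤ oddsList.length ∧ ∀ h ∈ handList, pvHandOk h = true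
instance (handList : List String) (oddsList : List Int) : Decidable (Pre_createTransformedHandOddsDict handList oddsList) := by unfold Pre_createTransformedHandOddsDict; infer_instance

def pvWitness_createTransformedHandOddsDict : List String × List Int :=
  (["AS, KS", "AH, KD", "AS, AD"], [1, 2, 3])

def Spec_createTransformedHandOddsDict (handList : List String) (oddsList : List Int) (out : List (String × List Int)) : Prop := out = createTransformedHandOddsDict_alt handList oddsList
instance (handList : List String) (oddsList : List Int) (out : List (String × List Int)) : Decidable (Spec_createTransformedHandOddsDict handList oddsList out) := by unfold Spec_createTransformedHandOddsDict; infer_instance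

-- ===== CLAIM (what is proved, stated in full; the proofs are below) =====
def Claim_equal_createTransformedHandOddsDict : Prop := ∀ (handList : List String) (oddsList : List Int), Dom_createTransformedHandOddsDict handList oddsList → Pre_createTransformedHandOddsDict handList oddsList → Spec_createTransformedHandOddsDict handList oddsList (createTransformedHandOddsDict handList oddsList)

-- ===== LEMMAS AND PROOFS =====

-- the index loop over range(len(handList)) reads exactly the zipped pairs when oddsList is long enough
lemma map_range_pair_eq_zip (hs : List String) (os : List Int) (hlen : hs.length ≤ os.length) :
    (PySem.List.pyRange 0 hs.length 1).map
      (fun i => (PySem.List.pyGetD hs i "", PySem.List.pyGetD os i 0)) = hs.zip os := by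
  apply List.ext_getElem
  · simp [PySem.List.length_pyRange_one, List.length_zip]; omega
  · intro k h1 h2
    simp only [List.getElem_map, PySem.List.getElem_pyRange_one, List.getElem_zip]
    rw [zero_add]
    rw [PySem.List.pyGetD_natCast, PySem.List.pyGetD_natCast]
    simp at h1 h2 ⊢
    constructor <;> · rw [List.getElem?_eq_getElem (by omega)]; rfl

-- A's loop body collapses: the conditional seeding insert is absorbed by modify
lemma step_eq_modify (d : PySem.Dict String (List Int)) (t : String) (o : Int) :
    (if d.contains t then d else d.insert t ([] : List Int)).modify t [] (· ++ [o])
      = d.modify t [] (· ++ [o]) := by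
  by_cases h : d.contains t
  · simp [h]
  · have hf : d.contains t = false := by simpa using h
    simp only [hf, Bool.false_eq_true, if_false]
    simp [PySem.Dict.modify, PySem.Dict.insert_insert_self, PySem.Dict.getD_insert_self,
      PySem.Dict.getD_of_not_contains d ([] : List Int) hf]

-- ===== VERDICT (by name: the statement is the Claim_ definition above) =====
theorem createTransformedHandOddsDict_spec : Claim_equal_createTransformedHandOddsDict := by
  intro handList oddsList _hdom hpre
  obtain ⟨hlen, -⟩ := hpre
  unfold Spec_createTransformedHandOddsDict
  unfold createTransformedHandOddsDict createTransformedHandOddsDict_alt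
  simp only []
  have h1 : (PySem.List.pyRange 0 (handList.length : Int)).foldl
      (fun d i =>
        (if d.contains (transformHand (PySem.List.pyGetD handList i "")) = true then d
            else d.insert (transformHand (PySem.List.pyGetD handList i "")) []).modify
          (transformHand (PySem.List.pyGetD handList i "")) [] (fun x => x ++ [PySem.List.pyGetD oddsList i 0]))
      PySem.Dict.empty
    = (handList.zip oddsList).foldl
      (fun d p =>
        (if d.contains (transformHand p.1) = true then d
            else d.insert (transformHand p.1) []).modify
          (transformHand p.1) [] (fun x => x ++ [p.2]))
      PySem.Dict.empty := by
    rw [← map_range_pair_eq_zip handList oddsList hlen, List.foldl_map]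
  rw [h1]
  simp only [step_eq_modify]
  have h2 : (handList.zip oddsList).foldl
      (fun d p => d.modify (transformHand p.1) [] (fun x => x ++ [p.2])) PySem.Dict.empty
    = ((handList.zip oddsList).map (fun p => (transformHand p.1, p.2))).foldl
      (fun d p => d.modify p.1 [] (fun x => x ++ [p.2])) PySem.Dict.empty := by
    rw [List.foldl_map]
  rw [h2]
  set pairs := (handList.zip oddsList).map (fun p => (transformHand p.1, p.2)) with hpairs
  have hnodup : ((pairs.foldl (fun d p => d.modify p.1 [] (fun x => x ++ [p.2])) PySem.Dict.empty).keys).Nodup :=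
    PySem.Dict.nodup_keys_foldl_modify_key pairs (fun p => p.1) ([] : List Int)
      (fun _ p => (· ++ [p.2])) PySem.Dict.empty (by simp)
  rw [PySem.Dict.items_eq_map_keys _ hnodup ([] : List Int)]
  have hkeys : (pairs.foldl (fun d p => d.modify p.1 [] (fun x => x ++ [p.2])) PySem.Dict.empty).keys
      = PySem.List.dedup (pairs.map (fun p => p.1)) := by
    have := PySem.Dict.keys_foldl_modify_key pairs (fun p => p.1) ([] : List Int)
      (fun _ p => (· ++ [p.2])) PySem.Dict.empty
    simpa [PySem.Set.update_empty] using this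
  rw [hkeys]
  apply List.map_congr_left
  intro l _
  rw [PySem.Dict.getD_foldl_modify_append]
  simp
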